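-- pv_equiv track=rewrite | github.com/rohandas14/e2e-coref | preprocess.py | get_sent_map
-- ===== SOURCE A (Python) =====
-- def get_sent_map(segments, sentence_end):
--     assert len(sentence_end) == sum([len(seg) - 2 for seg in segments])  # of subtokens in all segments
--     sent_map = []
--     sent_idx, subtok_idx = 0, 0
--     for segment in segments:
--         sent_map.append(sent_idx)  # [CLS]
--         for i in range(len(segment) - 2):
--             sent_map.append(sent_idx)
--             sent_idx += int(sentence_end[subtok_idx])
--             subtok_idx += 1
--         sent_map.append(sent_idx)  # [SEP]
--     return sent_map
-- ===== SOURCE B (Python) =====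
-- def get_sent_map(segments, sentence_end):
--     assert len(sentence_end) == sum([len(seg) - 2 for seg in segments])
--     # prefix-sum table: cum[k] = number of sentence ends among the first k subtokens
--     cum = [0]
--     for e in sentence_end:
--         cum.append(cum[-1] + int(e))
--     sent_map = []
--     g = 0  # subtokens consumed so far
--     for seg in segments:
--         m = len(seg) - 2
--         sent_map.append(cum[g])          # [CLS]
--         sent_map.extend(cum[g:g + m])    # subtokens
--         sent_map.append(cum[g + m])      # [SEP]
--         g += m
--     return sent_map
-- ===== Notes on version B (the rewrite author's own statement) =====
-- stated objective: alternative
-- what changed: B precomputes a prefix-sum table cum (cum[k] = sentence ends among the first k subtokens) and builds each segment's block by indexing and slicing that table with a running offset, instead of A's inline per-subtoken counter incrementing.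
import Mathlib
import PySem

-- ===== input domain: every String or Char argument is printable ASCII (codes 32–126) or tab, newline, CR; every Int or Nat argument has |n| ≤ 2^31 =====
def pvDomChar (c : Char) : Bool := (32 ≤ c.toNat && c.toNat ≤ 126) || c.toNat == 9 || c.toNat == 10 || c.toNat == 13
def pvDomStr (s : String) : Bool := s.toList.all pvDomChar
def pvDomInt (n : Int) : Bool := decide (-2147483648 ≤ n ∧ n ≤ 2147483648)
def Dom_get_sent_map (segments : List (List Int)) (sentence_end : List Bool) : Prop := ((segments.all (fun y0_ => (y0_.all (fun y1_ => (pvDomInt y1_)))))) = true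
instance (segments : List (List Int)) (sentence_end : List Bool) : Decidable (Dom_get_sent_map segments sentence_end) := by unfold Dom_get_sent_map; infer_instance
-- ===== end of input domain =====

-- B replaces A's running sentence counter by a precomputed prefix-sum table indexed/sliced per segment (alternative decomposition, same cost).

-- ===== PORT A =====
def get_sent_map (segments : List (List Int)) (sentence_end : List Bool) : List Int :=
  -- assert: Pre_ excludes inputs where it fails or where sentence_end[subtok_idx] raises
  let st := segments.foldl
    (fun (acc : List Int × Int × Int) segment =>
      let sm := acc.1 ++ [acc.2.1]
      let inner := (PySem.List.pyRange 0 ((segment.length : Int) - 2) 1).foldl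
        (fun (st2 : List Int × Int × Int) _ =>
          (st2.1 ++ [st2.2.1],
           st2.2.1 + (if PySem.List.pyGetD sentence_end st2.2.2 false then 1 else 0),
           st2.2.2 + 1))
        (sm, acc.2.1, acc.2.2)
      (inner.1 ++ [inner.2.1], inner.2.1, inner.2.2))
    ([], 0, 0)
  st.1

-- ===== PORT B =====
def get_sent_map_alt (segments : List (List Int)) (sentence_end : List Bool) : List Int :=
  let cum := sentence_end.foldl
    (fun c e => c ++ [PySem.List.pyGetD c (-1) 0 + (if e then 1 else 0)]) [0]
  let st := segments.foldl
    (fun (acc : List Int × Int) seg =>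
      let m : Int := (seg.length : Int) - 2
      (acc.1 ++ [PySem.List.pyGetD cum acc.2 0]
            ++ PySem.List.slice cum (some acc.2) (some (acc.2 + m))
            ++ [PySem.List.pyGetD cum (acc.2 + m) 0],
       acc.2 + m))
    ([], 0)
  st.1

-- ===== PRECONDITION & SPEC =====
-- Pre_ excludes exactly the inputs where Python A raises: AssertionError when
-- len(sentence_end) ≠ Σ(len(seg)-2), and IndexError (reachable only via a segment of
-- length < 2, whose negative contribution makes the counted subtokens overrun sentence_end).
def Pre_get_sent_map (segments : List (List Int)) (sentence_end : List Bool) : Prop :=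
  (∀ seg ∈ segments, 2 ≤ seg.length) ∧
  (segments.map (fun s => (s.length : Int) - 2)).sum = (sentence_end.length : Int)
instance (segments : List (List Int)) (sentence_end : List Bool) : Decidable (Pre_get_sent_map segments sentence_end) := by unfold Pre_get_sent_map; infer_instance

def pvWitness_get_sent_map : List (List Int) × List Bool := ([[1, 2, 3], [4, 5, 6, 7]], [true, false, true])

def Spec_get_sent_map (segments : List (List Int)) (sentence_end : List Bool) (out : List Int) : Prop := out = get_sent_map_alt segments sentence_end
instance (segments : List (List Int)) (sentence_end : List Bool) (out : List Int) : Decidable (Spec_get_sent_map segments sentence_end out) := by unfold Spec_get_sent_map; infer_instance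

-- ===== CLAIM (what is proved, stated in full; the proofs are below) =====
def Claim_equal_get_sent_map : Prop := ∀ (segments : List (List Int)) (sentence_end : List Bool), Dom_get_sent_map segments sentence_end → Pre_get_sent_map segments sentence_end → Spec_get_sent_map segments sentence_end (get_sent_map segments sentence_end)

-- ===== LEMMAS AND PROOFS =====

-- pvCnt se j = number of sentence ends among the first j subtokens
-- (= A's sent_idx after consuming j subtokens = B's cum[j])
def pvCnt (se : List Bool) (j : Nat) : Int := ((se.take j).countP id : Int)

-- the sentence-index blocks the result is made of, one per segment
def pvBlocks (se : List Bool) : List (List Int) → Nat → List Int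
  | [], _ => []
  | s :: rest, g =>
    [pvCnt se g] ++ (List.range (s.length - 2)).map (fun i => pvCnt se (g + i))
      ++ [pvCnt se (g + (s.length - 2))] ++ pvBlocks se rest (g + (s.length - 2))

-- the two folds, named so the induction can refer to them (definitionally the ports' loops)
def pvFoldA (se : List Bool) (segs : List (List Int)) (st : List Int × Int × Int) :
    List Int × Int × Int :=
  segs.foldl
    (fun (acc : List Int × Int × Int) segment =>
      let sm := acc.1 ++ [acc.2.1]
      let inner := (PySem.List.pyRange 0 ((segment.length : Int) - 2) 1).foldl
        (fun (st2 : List Int × Int × Int) _ =>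
          (st2.1 ++ [st2.2.1],
           st2.2.1 + (if PySem.List.pyGetD se st2.2.2 false then 1 else 0),
           st2.2.2 + 1))
        (sm, acc.2.1, acc.2.2)
      (inner.1 ++ [inner.2.1], inner.2.1, inner.2.2)) st

def pvFoldB (cum : List Int) (segs : List (List Int)) (st : List Int × Int) :
    List Int × Int :=
  segs.foldl
    (fun (acc : List Int × Int) seg =>
      let m : Int := (seg.length : Int) - 2
      (acc.1 ++ [PySem.List.pyGetD cum acc.2 0]
            ++ PySem.List.slice cum (some acc.2) (some (acc.2 + m))
            ++ [PySem.List.pyGetD cum (acc.2 + m) 0],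
       acc.2 + m)) st

theorem pvGetSentMap_eq_foldA (segments : List (List Int)) (sentence_end : List Bool) :
    get_sent_map segments sentence_end = (pvFoldA sentence_end segments ([], 0, 0)).1 := rfl

theorem pvGetSentMapAlt_eq_foldB (segments : List (List Int)) (sentence_end : List Bool) :
    get_sent_map_alt segments sentence_end
      = (pvFoldB (sentence_end.foldl
          (fun c e => c ++ [PySem.List.pyGetD c (-1) 0 + (if e then 1 else 0)]) [0])
          segments ([], 0)).1 := rfl

theorem pvCnt_succ (se : List Bool) (j : Nat) (hj : j < se.length) :
    pvCnt se (j + 1) = pvCnt se j + (if se.getD j false then 1 else 0) := by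
  have h1 : se.take (j + 1) = se.take j ++ [se[j]] := by
    rw [List.take_add_one, List.getElem?_eq_getElem hj]
    rfl
  unfold pvCnt
  rw [h1, List.countP_append, List.getD_eq_getElem?_getD, List.getElem?_eq_getElem hj]
  cases hb : se[j] <;> simp

theorem pvCum_eq (se : List Bool) :
    se.foldl (fun c e => c ++ [PySem.List.pyGetD c (-1) 0 + (if e then 1 else 0)]) [0]
      = (List.range (se.length + 1)).map (pvCnt se) := by
  induction se using List.reverseRecOn with
  | nil => simp [pvCnt]
  | append_singleton xs e ih =>
    rw [List.foldl_append, List.foldl_cons, List.foldl_nil, ih]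
    have hlast : (List.range (xs.length + 1)).map (pvCnt xs)
        = (List.range xs.length).map (pvCnt xs) ++ [pvCnt xs xs.length] := by
      rw [List.range_succ, List.map_append]; rfl
    have hagree : (List.range (xs.length + 1)).map (pvCnt (xs ++ [e]))
        = (List.range (xs.length + 1)).map (pvCnt xs) := by
      apply List.map_congr_left
      intro j hj
      have hj' : j ≤ xs.length := by have := List.mem_range.mp hj; omega
      unfold pvCnt
      rw [List.take_append_of_le_length hj']
    have hlaste : pvCnt (xs ++ [e]) (xs.length + 1)
        = pvCnt xs xs.length + (if e then 1 else 0) := by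
      unfold pvCnt
      rw [List.take_of_length_le (by simp), List.take_length, List.countP_append]
      cases e <;> simp
    have hlen : (xs ++ [e]).length = xs.length + 1 := by simp
    rw [hlast, PySem.List.pyGetD_neg_one_append_singleton, hlen, List.range_succ,
      List.map_append, hagree, hlast]
    simp [hlaste, List.append_assoc]

theorem pvInnerA (se : List Bool) (m g : Nat) (hg : g + m ≤ se.length) (sm : List Int) :
    (PySem.List.pyRange 0 (m : Int) 1).foldl
        (fun (st2 : List Int × Int × Int) _ =>
          (st2.1 ++ [st2.2.1],
           st2.2.1 + (if PySem.List.pyGetD se st2.2.2 false then 1 else 0),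
           st2.2.2 + 1))
        (sm, pvCnt se g, (g : Int))
      = (sm ++ (List.range m).map (fun i => pvCnt se (g + i)), pvCnt se (g + m),
         ((g + m : Nat) : Int)) := by
  induction m with
  | zero => simp [PySem.List.pyRange_one_eq_nil]
  | succ k ih =>
    have hk : g + k ≤ se.length := by omega
    have hcast : ((k + 1 : Nat) : Int) = (k : Int) + 1 := by push_cast; ring
    rw [hcast, PySem.List.pyRange_one_succ_right (by positivity), List.foldl_append,
      ih hk, List.foldl_cons, List.foldl_nil]
    rw [PySem.List.pyGetD_natCast, ← pvCnt_succ se (g + k) (by omega)]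
    have h1 : g + (k + 1) = (g + k) + 1 := by ring
    rw [h1, List.range_succ, List.map_append, ← List.append_assoc]
    push_cast
    rfl

theorem pvSumNonneg (segs : List (List Int)) (h2 : ∀ s ∈ segs, 2 ≤ s.length) :
    0 ≤ (segs.map (fun s => (s.length : Int) - 2)).sum := by
  apply List.sum_nonneg
  intro x hx
  obtain ⟨s, hs, rfl⟩ := List.mem_map.mp hx
  have := h2 s hs
  omega

theorem pvOuterA (se : List Bool) (segs : List (List Int)) (g : Nat) (sm : List Int)
    (h2 : ∀ s ∈ segs, 2 ≤ s.length)
    (hsum : (g : Int) + (segs.map (fun s => (s.length : Int) - 2)).sum = (se.length : Int)) :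
    (pvFoldA se segs (sm, pvCnt se g, (g : Int))).1 = sm ++ pvBlocks se segs g := by
  induction segs generalizing g sm with
  | nil => simp [pvFoldA, pvBlocks]
  | cons s rest ih =>
    have hs2 : 2 ≤ s.length := h2 s (by simp)
    have hrest : 0 ≤ (rest.map (fun s => (s.length : Int) - 2)).sum :=
      pvSumNonneg rest (fun x hx => h2 x (by simp [hx]))
    have hsum' : ((s.length : Int) - 2) + (rest.map (fun s => (s.length : Int) - 2)).sum
        = (se.length : Int) - g := by
      simp only [List.map_cons, List.sum_cons] at hsum; omega
    set m : Nat := s.length - 2 with hm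
    have hmc : (s.length : Int) - 2 = ((m : Nat) : Int) := by omega
    have hgm : g + m ≤ se.length := by omega
    simp only [pvFoldA, List.foldl_cons]
    rw [hmc, pvInnerA se m g hgm (sm ++ [pvCnt se g])]
    have hih := ih (g + m)
      (sm ++ [pvCnt se g] ++ (List.range m).map (fun i => pvCnt se (g + i)) ++ [pvCnt se (g + m)])
      (fun x hx => h2 x (by simp [hx])) (by push_cast; omega)
    rw [pvFoldA] at hih
    rw [hih]
    simp [pvBlocks, List.append_assoc, hm]

theorem pvCumGet (se : List Bool) (g : Nat) (hg : g ≤ se.length) :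
    PySem.List.pyGetD ((List.range (se.length + 1)).map (pvCnt se)) ((g : Nat) : Int) 0
      = pvCnt se g := by
  rw [PySem.List.pyGetD_natCast]
  rw [List.getD_eq_getElem?_getD, List.getElem?_map, List.getElem?_range (by omega)]
  rfl

theorem pvCumSlice (se : List Bool) (g m : Nat) (hg : g + m ≤ se.length) :
    PySem.List.slice ((List.range (se.length + 1)).map (pvCnt se))
        (some ((g : Nat) : Int)) (some (((g : Nat) : Int) + ((m : Nat) : Int)))
      = (List.range m).map (fun i => pvCnt se (g + i)) := by
  rw [PySem.List.slice_natCast_add]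
  apply List.ext_getElem
  · simp; omega
  · intro i h1 h2
    simp [List.getElem_take, List.getElem_drop]

theorem pvOuterB (se : List Bool) (segs : List (List Int)) (g : Nat) (sm : List Int)
    (h2 : ∀ s ∈ segs, 2 ≤ s.length)
    (hsum : (g : Int) + (segs.map (fun s => (s.length : Int) - 2)).sum = (se.length : Int)) :
    (pvFoldB ((List.range (se.length + 1)).map (pvCnt se)) segs (sm, (g : Int))).1
      = sm ++ pvBlocks se segs g := by
  induction segs generalizing g sm with
  | nil => simp [pvFoldB, pvBlocks]
  | cons s rest ih =>
    have hs2 : 2 ≤ s.length := h2 s (by simp)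
    have hrest : 0 ≤ (rest.map (fun s => (s.length : Int) - 2)).sum :=
      pvSumNonneg rest (fun x hx => h2 x (by simp [hx]))
    have hsum' : ((s.length : Int) - 2) + (rest.map (fun s => (s.length : Int) - 2)).sum
        = (se.length : Int) - g := by
      simp only [List.map_cons, List.sum_cons] at hsum; omega
    set m : Nat := s.length - 2 with hm
    have hmc : (s.length : Int) - 2 = ((m : Nat) : Int) := by omega
    have hgm : g + m ≤ se.length := by omega
    simp only [pvFoldB, List.foldl_cons]
    rw [hmc, pvCumGet se g (by omega), pvCumSlice se g m hgm,
      show ((g : Nat) : Int) + ((m : Nat) : Int) = ((g + m : Nat) : Int) by push_cast; ring,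
      pvCumGet se (g + m) (by omega)]
    have hih := ih (g + m)
      (sm ++ [pvCnt se g] ++ (List.range m).map (fun i => pvCnt se (g + i)) ++ [pvCnt se (g + m)])
      (fun x hx => h2 x (by simp [hx])) (by push_cast; omega)
    rw [pvFoldB] at hih
    rw [hih]
    simp [pvBlocks, List.append_assoc, hm]

-- ===== VERDICT (by name: the statement is the Claim_ definition above) =====
theorem get_sent_map_spec : Claim_equal_get_sent_map := by
  intro segments sentence_end _hdom hpre
  obtain ⟨h2, hsum⟩ := hpre
  unfold Spec_get_sent_map
  rw [pvGetSentMap_eq_foldA, pvGetSentMapAlt_eq_foldB, pvCum_eq]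
  have hA := pvOuterA sentence_end segments 0 [] h2 (by simpa using hsum)
  have hB := pvOuterB sentence_end segments 0 [] h2 (by simpa using hsum)
  simp only [pvCnt, List.take_zero, List.countP_nil, Nat.cast_zero] at hA hB
  rw [hA, hB]
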